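-- pv_equiv track=rewrite | github.com/nrakshi3060/ShowmeDataStructures | Concepts/MinimumBracketReversal.py | remove_balanced
-- ===== SOURCE A (Python) =====
-- def remove_balanced(input_str):
--     stack = []
--     for char in input_str:
--         if char == '}' and len(stack) != 0:
--             if stack[len(stack) - 1] == '{':
--                 stack.pop()
--             else:
--                 stack.append(char)
--         else:
--             stack.append(char)
--
--     return stack
-- ===== SOURCE B (Python) =====
-- def remove_balanced(input_str):
--     s = input_str
--     while '{}' in s:
--         s = s.replace('{}', '')
--     return list(s)
-- ===== Notes on version B (the rewrite author's own statement) =====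
-- stated objective: simpler
-- what changed: Replaces the explicit stack with repeated deletion of adjacent '{}' pairs via str.replace to a fixpoint; equivalence holds by confluence of the '{}'-deletion rewrite.
import Mathlib
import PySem

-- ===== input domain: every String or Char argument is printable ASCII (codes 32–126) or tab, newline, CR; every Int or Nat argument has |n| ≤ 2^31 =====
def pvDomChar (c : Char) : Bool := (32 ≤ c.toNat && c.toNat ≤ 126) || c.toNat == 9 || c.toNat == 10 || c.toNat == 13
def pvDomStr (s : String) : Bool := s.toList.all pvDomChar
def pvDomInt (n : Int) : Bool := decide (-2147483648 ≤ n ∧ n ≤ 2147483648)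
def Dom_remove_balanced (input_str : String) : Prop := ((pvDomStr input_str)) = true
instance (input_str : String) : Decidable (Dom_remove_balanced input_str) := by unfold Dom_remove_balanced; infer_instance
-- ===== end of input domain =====

-- B replaces A's explicit stack with repeated deletion of adjacent "{}" pairs to a fixpoint (simpler; equal by confluence of the rewrite).


-- ===== PORT A =====
-- the Python stack (append/pop at the end, top = stack[len(stack)-1]) is kept REVERSED here
-- (top = head, append = cons, pop = tail) and reversed back at the return — exact
def pvStepA (stack : List Char) (c : Char) : List Char :=
  if c = '}' ∧ stack ≠ [] then
    if stack.head? = some '{' then stack.tail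
    else c :: stack
  else c :: stack

def remove_balanced (input_str : String) : List String :=
  ((input_str.toList.foldl pvStepA []).reverse).map (fun c => String.ofList [c])

-- ===== PORT B =====
-- s.replace("{}", "") : delete every (non-overlapping, left-to-right) adjacent '{','}' pair — exact
def pvReplaceBr : List Char → List Char
  | '{' :: '}' :: rest => pvReplaceBr rest
  | c :: rest => c :: pvReplaceBr rest
  | [] => []

-- '"{}" in s' — exact
def pvHasBr : List Char → Bool
  | '{' :: '}' :: _ => true
  | _ :: rest => pvHasBr rest
  | [] => false

-- needed by pvLoopBr's termination proof (cited in decreasing_by)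
theorem pvReplaceBr_len_le : ∀ (l : List Char), (pvReplaceBr l).length ≤ l.length := by
  intro l
  fun_induction pvReplaceBr l with
  | case1 rest ih => simp; omega
  | case2 x xs h ih => simp; omega
  | case3 => simp

theorem pvHasBr_cons (x : Char) (xs : List Char)
    (h : ∀ rest, x = '{' → xs = '}' :: rest → False) :
    pvHasBr (x :: xs) = pvHasBr xs := by
  conv_lhs => unfold pvHasBr
  split
  · rename_i heq
    injection heq with h1 h2
    exact absurd h2 (fun h2 => h _ h1 h2)
  · rename_i head rest heq
    injection heq with h1 h2
    rw [h2]
  · rename_i heq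
    exact absurd heq (by simp)

theorem pvReplaceBr_len_lt : ∀ (l : List Char), pvHasBr l = true →
    (pvReplaceBr l).length < l.length := by
  intro l
  fun_induction pvReplaceBr l with
  | case1 rest ih => intro _; have := pvReplaceBr_len_le rest; simp; omega
  | case2 x xs h ih =>
      intro hh
      rw [pvHasBr_cons x xs h] at hh
      have := ih hh
      simp; omega
  | case3 => intro hh; simp [pvHasBr] at hh

-- the while loop of B: delete pairs until no "{}" remains
def pvLoopBr (l : List Char) : List Char :=
  if h : pvHasBr l = true then pvLoopBr (pvReplaceBr l) else l
termination_by l.length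
decreasing_by exact pvReplaceBr_len_lt l h

def remove_balanced_alt (input_str : String) : List String :=
  (pvLoopBr input_str.toList).map (fun c => String.ofList [c])

-- ===== PRECONDITION & SPEC =====
def Spec_remove_balanced (input_str : String) (out : List String) : Prop := out = remove_balanced_alt input_str
instance (input_str : String) (out : List String) : Decidable (Spec_remove_balanced input_str out) := by unfold Spec_remove_balanced; infer_instance

-- ===== CLAIM (what is proved, stated in full; the proofs are below) =====
def Claim_equal_remove_balanced : Prop := ∀ (input_str : String), Dom_remove_balanced input_str → Spec_remove_balanced input_str (remove_balanced input_str)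

-- ===== LEMMAS AND PROOFS =====

-- deleting one adjacent "{}" pair does not change A's stack fold (from any stack)
theorem pvFold_replaceBr : ∀ (l : List Char), ∀ (st : List Char),
    List.foldl pvStepA st (pvReplaceBr l) = List.foldl pvStepA st l := by
  intro l
  fun_induction pvReplaceBr l with
  | case1 rest ih =>
      intro st
      have h1 : pvStepA st '{' = '{' :: st := by simp [pvStepA]
      have h2 : pvStepA ('{' :: st) '}' = st := by simp [pvStepA]
      simp [List.foldl, h1, h2, ih st]
  | case2 x xs h ih =>
      intro st
      simp [List.foldl, ih (pvStepA st x)]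
  | case3 => intro st; rfl

theorem pvHasBr_cons_false (c : Char) (rest : List Char)
    (h : pvHasBr (c :: rest) = false) :
    pvHasBr rest = false ∧ ¬(c = '{' ∧ rest.head? = some '}') := by
  by_cases hm : c = '{' ∧ ∃ t, rest = '}' :: t
  · obtain ⟨hc, t, ht⟩ := hm
    subst hc; subst ht
    simp [pvHasBr] at h
  · have hnm : ∀ r, c = '{' → rest = '}' :: r → False := by
      intro r hc hr; exact hm ⟨hc, r, hr⟩
    rw [pvHasBr_cons c rest hnm] at h
    refine ⟨h, ?_⟩
    rintro ⟨hc, hh⟩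
    cases rest with
    | nil => simp at hh
    | cons d t =>
        simp at hh
        exact hm ⟨hc, t, by rw [hh]⟩

-- on a string with no "{}", A's stack fold just pushes every character
theorem pvFold_nf : ∀ (l acc : List Char), pvHasBr l = false →
    ¬(acc.head? = some '{' ∧ l.head? = some '}') →
    List.foldl pvStepA acc l = l.reverse ++ acc := by
  intro l
  induction l with
  | nil => intro acc _ _; simp
  | cons c rest ih =>
      intro acc hbr hcond
      obtain ⟨hbr', hcr⟩ := pvHasBr_cons_false c rest hbr
      have hstep : pvStepA acc c = c :: acc := by
        unfold pvStepA
        split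
        · rename_i hc
          split
          · rename_i hh
            exact absurd ⟨hh, by simp [hc.1]⟩ hcond
          · rfl
        · rfl
      have hcond' : ¬((c :: acc).head? = some '{' ∧ rest.head? = some '}') := by
        rintro ⟨h1, h2⟩
        simp at h1
        exact hcr ⟨h1, h2⟩
      simp [List.foldl, hstep, ih (c :: acc) hbr' hcond']

-- the loop preserves A's fold and ends in a "{}"-free string
theorem pvLoop_fold : ∀ (l : List Char),
    List.foldl pvStepA [] (pvLoopBr l) = List.foldl pvStepA [] l := by
  intro l
  fun_induction pvLoopBr l with
  | case1 l h ih => rw [ih, pvFold_replaceBr]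
  | case2 l h => rfl

theorem pvLoop_nf : ∀ (l : List Char), pvHasBr (pvLoopBr l) = false := by
  intro l
  fun_induction pvLoopBr l with
  | case1 l h ih => exact ih
  | case2 l h => simpa using h

-- ===== VERDICT (by name: the statement is the Claim_ definition above) =====
theorem remove_balanced_spec : Claim_equal_remove_balanced := by
  intro s _
  unfold Spec_remove_balanced remove_balanced remove_balanced_alt
  have h1 : List.foldl pvStepA [] s.toList = (pvLoopBr s.toList).reverse := by
    rw [← pvLoop_fold s.toList,
        pvFold_nf (pvLoopBr s.toList) [] (pvLoop_nf s.toList) (by simp)]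
    simp
  rw [h1, List.reverse_reverse]
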